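-- pv_equiv track=rewrite | github.com/Raamkishore/Google-foobar-queue-to-do-Level-3 | queue_to_do.py | solution
-- ===== SOURCE A (Python) =====
-- def xor(n):
--     val = n % 4
--     if val == 0:
--         return n
--     if val == 1:
--         return 1
--     if val == 2:
--         return n + 1
--     return 0
--
-- def solution(start, length):
--
--     res = 0
--     st = start - 1
--
--     for i in range(length):
--         sp = st + length - i
--         res ^= xor(st) ^ xor(sp)
--         st = sp + i
--
--     return res
-- ===== SOURCE B (Python) =====
-- def _pf(n):
--     # XOR of 0..n (period-4 pattern), read off a 4-entry table
--     return (n, 1, n + 1, 0)[n % 4]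
--
--
-- def _xor_range(a, b):
--     # XOR of all integers in range(a, b) for a <= b
--     return _pf(a - 1) ^ _pf(b - 1)
--
--
-- def solution(start, length):
--     # XOR the whole square block of ids in O(1), then cancel the skipped
--     # triangle: row i leaves its last i ids unchecked.
--     n = max(length, 0)
--     total = _xor_range(start, start + n * n)
--     for i in range(n):
--         row_end = start + (i + 1) * n
--         total ^= _xor_range(row_end - i, row_end)
--     return total
-- ===== Notes on version B (the rewrite author's own statement) =====
-- stated objective: alternative
-- what changed: Instead of walking the checked ranges row by row with a running accumulator, B XORs the entire square id block [start, start+n^2) in O(1) via the period-4 prefix-XOR formula and then cancels the skipped triangle (the last i ids of row i), relying on XOR self-cancellation.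
import Mathlib
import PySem

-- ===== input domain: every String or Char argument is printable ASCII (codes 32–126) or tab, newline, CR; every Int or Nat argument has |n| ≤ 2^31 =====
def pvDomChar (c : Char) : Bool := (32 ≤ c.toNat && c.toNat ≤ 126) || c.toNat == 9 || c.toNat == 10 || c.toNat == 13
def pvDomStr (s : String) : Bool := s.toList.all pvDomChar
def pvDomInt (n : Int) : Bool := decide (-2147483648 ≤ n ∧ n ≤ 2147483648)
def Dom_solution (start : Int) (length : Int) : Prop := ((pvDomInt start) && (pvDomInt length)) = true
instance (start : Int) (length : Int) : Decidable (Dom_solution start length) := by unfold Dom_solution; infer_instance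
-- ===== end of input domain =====

-- B replaces A's row-by-row accumulator walk by XOR-ing the whole square id block in O(1)
-- and cancelling the skipped triangle (alternative decomposition, same O(length) cost).


-- ===== PORT A =====
-- helper xor(n) of Source A
def pyXor (n : Int) : Int :=
  let val := PySem.Int.mod n 4
  if val = 0 then n
  else if val = 1 then 1
  else if val = 2 then n + 1
  else 0

def solution (start : Int) (length : Int) : Int :=
  ((PySem.List.pyRange 0 length 1).foldl
    (fun (s : Int × Int) (i : Int) =>
      let sp := s.2 + length - i
      (PySem.Int.bxor s.1 (PySem.Int.bxor (pyXor s.2) (pyXor sp)), sp + i))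
    (0, start - 1)).1

-- ===== PORT B =====
-- helper _pf(n) of Source B: (n, 1, n+1, 0)[n % 4]; the index n % 4 is always in 0..3, so pyGetD is exact
def pfB (n : Int) : Int :=
  PySem.List.pyGetD [n, 1, n + 1, 0] (PySem.Int.mod n 4) 0

-- helper _xor_range(a, b) of Source B
def xorRangeB (a : Int) (b : Int) : Int :=
  PySem.Int.bxor (pfB (a - 1)) (pfB (b - 1))

def solution_alt (start : Int) (length : Int) : Int :=
  let n := max length 0
  (PySem.List.pyRange 0 n 1).foldl
    (fun (total : Int) (i : Int) =>
      let rowEnd := start + (i + 1) * n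
      PySem.Int.bxor total (xorRangeB (rowEnd - i) rowEnd))
    (xorRangeB start (start + n * n))

-- ===== PRECONDITION & SPEC =====
def Spec_solution (start : Int) (length : Int) (out : Int) : Prop := out = solution_alt start length
instance (start : Int) (length : Int) (out : Int) : Decidable (Spec_solution start length out) := by unfold Spec_solution; infer_instance

-- ===== CLAIM (what is proved, stated in full; the proofs are below) =====
def Claim_equal_solution : Prop := ∀ (start : Int) (length : Int), Dom_solution start length → Spec_solution start length (solution start length)

-- ===== LEMMAS AND PROOFS =====

-- B's table lookup computes the same prefix-XOR value as A's if-chain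
theorem pfB_eq_pyXor (n : Int) : pfB n = pyXor n := by
  have hm : PySem.Int.mod n 4 = n % 4 := by
    simp [PySem.Int.mod, Int.fmod_eq_emod]
  have h : n % 4 = 0 ∨ n % 4 = 1 ∨ n % 4 = 2 ∨ n % 4 = 3 := by omega
  unfold pfB pyXor
  rw [hm]
  rcases h with h | h | h | h <;> rw [h] <;>
    simp [PySem.List.pyGetD, PySem.List.pyIdx?, PySem.List.pyGet?]


theorem bxor_natCast_negSucc (m n : Nat) :
    PySem.Int.bxor (m : Int) (Int.negSucc n) = Int.negSucc (m ^^^ n) := by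
  have h0 : ¬ (0 : Int) ≤ Int.negSucc n := by omega
  have h1 : (-(Int.negSucc n) - 1).toNat = n := by omega
  simp [PySem.Int.bxor, Int.negSucc_eq]
  omega

theorem bxor_negSucc_natCast (m n : Nat) :
    PySem.Int.bxor (Int.negSucc m) (n : Int) = Int.negSucc (m ^^^ n) := by
  have h0 : ¬ (0 : Int) ≤ Int.negSucc m := by omega
  have h1 : (-(Int.negSucc m) - 1).toNat = m := by omega
  simp [PySem.Int.bxor, Int.negSucc_eq]
  omega

theorem bxor_negSucc_negSucc (m n : Nat) :
    PySem.Int.bxor (Int.negSucc m) (Int.negSucc n) = ((m ^^^ n : Nat) : Int) := by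
  have h0 : ¬ (0 : Int) ≤ Int.negSucc m := by omega
  have h0' : ¬ (0 : Int) ≤ Int.negSucc n := by omega
  have h1 : (-(Int.negSucc m) - 1).toNat = m := by omega
  have h1' : (-(Int.negSucc n) - 1).toNat = n := by omega
  simp [PySem.Int.bxor]

theorem bxor_assoc (a b c : Int) :
    PySem.Int.bxor (PySem.Int.bxor a b) c = PySem.Int.bxor a (PySem.Int.bxor b c) := by
  cases a <;> cases b <;> cases c <;>
    simp [PySem.Int.bxor_natCast, bxor_natCast_negSucc,
      bxor_negSucc_natCast, bxor_negSucc_negSucc, Nat.xor_assoc]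

theorem bxor_left_comm (a b c : Int) :
    PySem.Int.bxor a (PySem.Int.bxor b c) = PySem.Int.bxor b (PySem.Int.bxor a c) := by
  rw [← bxor_assoc, PySem.Int.bxor_comm a b, bxor_assoc]

-- the two fold bodies, named so the key lemma can speak about them
def bodyA (length : Int) : Int × Int → Int → Int × Int :=
  fun s i =>
    let sp := s.2 + length - i
    (PySem.Int.bxor s.1 (PySem.Int.bxor (pyXor s.2) (pyXor sp)), sp + i)

def bodyB (start length : Int) : Int → Int → Int :=
  fun total i =>
    let rowEnd := start + (i + 1) * length
    PySem.Int.bxor total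
      (PySem.Int.bxor (pyXor (rowEnd - i - 1)) (pyXor (rowEnd - 1)))

theorem key (start length : Int) :
    ∀ (k : Nat) (i res : Int), i + k = length →
    ((PySem.List.pyRange i length 1).foldl (bodyA length)
        (res, start - 1 + i * length)).1
    = (PySem.List.pyRange i length 1).foldl (bodyB start length)
        (PySem.Int.bxor res (PySem.Int.bxor (pyXor (start - 1 + i * length))
          (pyXor (start + length * length - 1)))) := by
  intro k
  induction k with
  | zero =>
    intro i res hi
    have hnil : PySem.List.pyRange i length 1 = [] :=
      PySem.List.pyRange_one_eq_nil (by omega)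
    have harg : start - 1 + i * length = start + length * length - 1 := by
      have : i = length := by omega
      subst this; ring
    simp [hnil, harg, PySem.Int.bxor_self, PySem.Int.bxor_zero]
  | succ k ih =>
    intro i res hi
    have hcons : PySem.List.pyRange i length 1 = i :: PySem.List.pyRange (i+1) length 1 :=
      PySem.List.pyRange_one_cons (by omega)
    rw [hcons]
    simp only [List.foldl_cons]
    -- unfold one step of each body
    have hstA : (bodyA length (res, start - 1 + i * length) i).2
        = start - 1 + (i + 1) * length := by
      simp [bodyA]; ring
    have hresA : (bodyA length (res, start - 1 + i * length) i).1
        = PySem.Int.bxor res (PySem.Int.bxor (pyXor (start - 1 + i * length))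
            (pyXor (start - 1 + i * length + length - i))) := by
      simp [bodyA]
    have hpair : bodyA length (res, start - 1 + i * length) i
        = ((bodyA length (res, start - 1 + i * length) i).1,
           start - 1 + (i + 1) * length) := by
      rw [← hstA]
    rw [hpair, hresA, ih (i+1) _ (by omega)]
    -- both sides are now folds of bodyB over the same list; align the start states
    congr 1
    show PySem.Int.bxor
        (PySem.Int.bxor res (PySem.Int.bxor (pyXor (start - 1 + i * length))
          (pyXor (start - 1 + i * length + length - i))))
        (PySem.Int.bxor (pyXor (start - 1 + (i + 1) * length))
          (pyXor (start + length * length - 1)))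
      = bodyB start length
          (PySem.Int.bxor res (PySem.Int.bxor (pyXor (start - 1 + i * length))
            (pyXor (start + length * length - 1)))) i
    have e1 : start + (i + 1) * length - i - 1 = start - 1 + i * length + length - i := by ring
    have e2 : start + (i + 1) * length - 1 = start - 1 + (i + 1) * length := by ring
    simp only [bodyB, e1, e2]
    simp [PySem.Int.bxor_comm, bxor_left_comm]

-- ===== VERDICT (by name: the statement is the Claim_ definition above) =====
theorem solution_spec : Claim_equal_solution := by
  intro start length _
  unfold Spec_solution solution solution_alt
  simp only [xorRangeB, pfB_eq_pyXor]
  by_cases h : 0 ≤ length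
  · have hmax : max length 0 = length := by omega
    rw [hmax]
    have h0 : start - 1 = start - 1 + 0 * length := by ring
    have := key start length length.toNat 0 0 (by omega)
    rw [h0]
    rw [show ((PySem.List.pyRange 0 length 1).foldl
        (fun (s : Int × Int) (i : Int) =>
          let sp := s.2 + length - i
          (PySem.Int.bxor s.1 (PySem.Int.bxor (pyXor s.2) (pyXor sp)), sp + i))
        (0, start - 1 + 0 * length)) = ((PySem.List.pyRange 0 length 1).foldl (bodyA length)
        (0, start - 1 + 0 * length)) from rfl]
    rw [this]
    have hinit : PySem.Int.bxor 0 (PySem.Int.bxor (pyXor (start - 1 + 0 * length))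
        (pyXor (start + length * length - 1)))
        = PySem.Int.bxor (pyXor (start - 1)) (pyXor (start + length * length - 1)) := by
      rw [PySem.Int.bxor_comm 0, PySem.Int.bxor_zero]
      ring_nf
    rw [hinit, show start - 1 + 0 * length = start - 1 from by ring]
    rfl
  · have hmax : max length 0 = 0 := by omega
    have hnilA : PySem.List.pyRange 0 length 1 = [] :=
      PySem.List.pyRange_one_eq_nil (by omega)
    rw [hmax, hnilA]
    simp [PySem.Int.bxor_self]
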